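-- pv_equiv track=rewrite | github.com/fedorovVNpin221/Python_Beginning_Course | homework_4/diana/homework5-6.py | count_subscriptions_with_repeats
-- ===== SOURCE A (Python) =====
-- def count_subscriptions_with_repeats(subscriptions):
--     count = 0
--     for subscription in subscriptions:
--         seen = {}
--         has_repeats = False
--         for number in subscription:
--             if number in seen:
--                 seen[number] += 1
--                 if seen[number] > 1:
--                     has_repeats = True
--             else:
--                 seen[number] = 1
--         if has_repeats:
--             count += 1
--     return count
-- ===== SOURCE B (Python) =====
-- def count_subscriptions_with_repeats(subscriptions):
--     count = 0
--     for s in subscriptions: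
--         t = sorted(s)
--         if any(a == b for a, b in zip(t, t[1:])):
--             count += 1
--     return count
-- ===== Notes on version B (the rewrite author's own statement) =====
-- stated objective: alternative
-- what changed: Replaces A's hashing approach (per-element dict of counts, membership branch, increment and boolean flag) with sort-then-adjacent-scan: each subscription is sorted and a repeat is detected as an equal adjacent pair, correct because in a sorted list duplicates are adjacent.
import Mathlib
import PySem

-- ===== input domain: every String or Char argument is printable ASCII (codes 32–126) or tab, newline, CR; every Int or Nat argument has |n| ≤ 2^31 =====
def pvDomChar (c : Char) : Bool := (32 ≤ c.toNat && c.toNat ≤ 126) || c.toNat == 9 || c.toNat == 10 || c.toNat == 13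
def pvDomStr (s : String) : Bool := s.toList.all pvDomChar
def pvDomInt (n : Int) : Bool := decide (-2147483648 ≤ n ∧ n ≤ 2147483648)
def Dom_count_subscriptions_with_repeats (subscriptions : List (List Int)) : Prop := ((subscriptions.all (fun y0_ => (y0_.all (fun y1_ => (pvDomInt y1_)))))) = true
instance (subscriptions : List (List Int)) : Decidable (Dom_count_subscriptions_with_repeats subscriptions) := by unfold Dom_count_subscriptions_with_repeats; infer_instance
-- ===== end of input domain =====

-- B replaces A's hashing (dict of counts + flag) with sort-then-adjacent-scan: each
-- subscription is sorted and a repeat is an equal adjacent pair (objective: alternative).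

-- ===== PORT A =====
def count_subscriptions_with_repeats (subscriptions : List (List Int)) : Int :=
  subscriptions.foldl (fun count subscription =>
    let st :=
      subscription.foldl (fun (st : PySem.Dict Int Int × Bool) number =>
        if st.1.contains number then
          let seen := st.1.modify number 0 (· + 1)
          (seen, if seen.getD number 0 > 1 then true else st.2)
        else
          (st.1.insert number 1, st.2))
        (PySem.Dict.empty, false)
    if st.2 then count + 1 else count) 0

-- ===== PORT B =====
-- t[1:] is ported as t.drop 1 (exact for the nonnegative slice start 1)
def count_subscriptions_with_repeats_alt (subscriptions : List (List Int)) : Int :=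
  subscriptions.foldl (fun count s =>
    let t := PySem.List.sorted s (fun x => x) false
    if (t.zip (t.drop 1)).any (fun p => p.1 == p.2) then count + 1 else count) 0

-- ===== PRECONDITION & SPEC =====
def Spec_count_subscriptions_with_repeats (subscriptions : List (List Int)) (out : Int) : Prop := out = count_subscriptions_with_repeats_alt subscriptions
instance (subscriptions : List (List Int)) (out : Int) : Decidable (Spec_count_subscriptions_with_repeats subscriptions out) := by unfold Spec_count_subscriptions_with_repeats; infer_instance

-- ===== CLAIM (what is proved, stated in full; the proofs are below) =====
def Claim_equal_count_subscriptions_with_repeats : Prop := ∀ (subscriptions : List (List Int)), Dom_count_subscriptions_with_repeats subscriptions → Spec_count_subscriptions_with_repeats subscriptions (count_subscriptions_with_repeats subscriptions)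

-- ===== LEMMAS AND PROOFS =====

-- the body of A's inner loop, named for the proofs
def pvStep (st : PySem.Dict Int Int × Bool) (number : Int) : PySem.Dict Int Int × Bool :=
  if st.1.contains number then
    let seen := st.1.modify number 0 (· + 1)
    (seen, if seen.getD number 0 > 1 then true else st.2)
  else
    (st.1.insert number 1, st.2)

-- once the flag is true it stays true
lemma pvStep_flag_mono (sub : List Int) (d : PySem.Dict Int Int) :
    (sub.foldl pvStep (d, true)).2 = true := by
  induction sub generalizing d with
  | nil => rfl
  | cons x rest ih =>
    simp only [List.foldl_cons, pvStep]
    split_ifs <;> simp [ih]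

-- characterisation of A's inner loop: flag is raised iff some element was
-- already a key or occurs twice in the remaining list
lemma pvInner_flag (sub : List Int) (d : PySem.Dict Int Int)
    (hpos : ∀ k, d.contains k = true → 1 ≤ d.getD k 0) :
    (sub.foldl pvStep (d, false)).2
      = decide ((∃ x ∈ sub, d.contains x = true) ∨ ¬ sub.Nodup) := by
  induction sub generalizing d with
  | nil => simp
  | cons x rest ih =>
    simp only [List.foldl_cons]
    rw [show pvStep (d, false) x = if d.contains x then
          (d.modify x 0 (· + 1), if (d.modify x 0 (· + 1)).getD x 0 > 1 then true else false)
        else (d.insert x 1, false) from by simp [pvStep]]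
    by_cases hc : d.contains x = true
    · have h1 : 1 ≤ d.getD x 0 := hpos x hc
      have hg : (d.modify x 0 (· + 1)).getD x 0 = d.getD x 0 + 1 := by
        simp [PySem.Dict.getD_modify_self]
      rw [if_pos hc, if_pos (by rw [hg]; omega), pvStep_flag_mono]
      refine (decide_eq_true ?_).symm
      exact Or.inl ⟨x, List.mem_cons.2 (Or.inl rfl), hc⟩
    · have hcx : d.contains x = false := by simpa using hc
      rw [if_neg hc, ih (d.insert x 1) ?_]
      · have h2 : (∃ y ∈ rest, (d.insert x 1).contains y = true)
            ↔ (x ∈ rest ∨ ∃ y ∈ rest, d.contains y = true) := by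
          constructor
          · rintro ⟨y, hy, h⟩
            rw [PySem.Dict.contains_insert] at h
            rcases (by simpa using h : y = x ∨ d.contains y = true) with rfl | h
            · exact Or.inl hy
            · exact Or.inr ⟨y, hy, h⟩
          · rintro (h | ⟨y, hy, h⟩)
            · exact ⟨x, h, by simp⟩
            · exact ⟨y, hy, by rw [PySem.Dict.contains_insert]; simp [h]⟩
        have h3 : (∃ y ∈ x :: rest, d.contains y = true)
            ↔ (∃ y ∈ rest, d.contains y = true) := by
          constructor
          · rintro ⟨y, hy, h⟩
            rcases List.mem_cons.1 hy with rfl | hy'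
            · exact absurd h (by simp [hcx])
            · exact ⟨y, hy', h⟩
          · rintro ⟨y, hy, h⟩
            exact ⟨y, List.mem_cons_of_mem _ hy, h⟩
        have h4 : (¬ (x :: rest).Nodup) ↔ (x ∈ rest ∨ ¬ rest.Nodup) := by
          rw [List.nodup_cons, not_and_or, not_not]
        congr 1
        simp only [eq_iff_iff]
        rw [h2, h3, h4]
        constructor
        · rintro ((h | h) | h)
          exacts [Or.inr (Or.inl h), Or.inl h, Or.inr (Or.inr h)]
        · rintro (h | h | h)
          exacts [Or.inl (Or.inr h), Or.inl (Or.inl h), Or.inr h]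
      · intro k hk
        by_cases hkx : k = x
        · subst hkx
          simp [PySem.Dict.getD_insert_self]
        · rw [PySem.Dict.getD_insert, if_neg hkx]
          apply hpos
          rw [PySem.Dict.contains_insert] at hk
          simpa [hkx] using hk

-- in a ≤-sorted list, an equal adjacent pair exists iff the list has a duplicate
lemma pvAdjEq_of_sorted (t : List Int) (hs : t.Pairwise (· ≤ ·)) :
    (t.zip (t.drop 1)).any (fun p => p.1 == p.2) = decide (¬ t.Nodup) := by
  induction t with
  | nil => simp
  | cons a rest ih =>
    cases rest with
    | nil => simp
    | cons b rest' =>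
      rcases List.pairwise_cons.1 hs with ⟨hab, hs'⟩
      have hab' : a ≤ b := hab b (List.mem_cons_self ..)
      simp only [List.drop_succ_cons, List.drop_zero, List.zip_cons_cons, List.any_cons]
      rw [show (b :: rest').zip ((b :: rest').drop 1) = (b :: rest').zip rest' from rfl] at ih
      rw [ih hs']
      by_cases heq : a = b
      · subst heq
        have : ¬ (a :: a :: rest').Nodup := by simp
        simp [this]
      · have halt : a < b := lt_of_le_of_ne hab' heq
        have hnotmem : a ∉ b :: rest' := by
          intro hmem
          rcases List.mem_cons.1 hmem with rfl | hmem'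
          · exact heq rfl
          · have hb : b ≤ a := (List.pairwise_cons.1 hs').1 a hmem'
            omega
        have hiff : (a :: b :: rest').Nodup ↔ (b :: rest').Nodup := by
          rw [List.nodup_cons]; exact ⟨fun h => h.2, fun h => ⟨hnotmem, h⟩⟩
        have hbeq : (a == b) = false := by simpa using heq
        simp only [hbeq, Bool.false_or]
        congr 1
        simp [hiff]

-- ===== VERDICT (by name: the statement is the Claim_ definition above) =====
theorem count_subscriptions_with_repeats_spec : Claim_equal_count_subscriptions_with_repeats := by
  intro subscriptions _
  unfold Spec_count_subscriptions_with_repeats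
  unfold count_subscriptions_with_repeats count_subscriptions_with_repeats_alt
  apply PySem.List.foldl_congr_mem
  intro count s _
  have hflag := pvInner_flag s PySem.Dict.empty (by intro k hk; simp [PySem.Dict.empty, PySem.Dict.contains] at hk)
  have hempty : ∀ x : Int, (PySem.Dict.empty : PySem.Dict Int Int).contains x = false := by
    intro x; simp [PySem.Dict.empty, PySem.Dict.contains]
  have hkey : (s.foldl pvStep (PySem.Dict.empty, false)).2 = decide (¬ s.Nodup) := by
    rw [hflag]; congr 1
    simp only [eq_iff_iff, or_iff_right_iff_imp]
    rintro ⟨x, _, hx⟩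
    rw [hempty x] at hx; exact absurd hx (by simp)
  show (if (s.foldl pvStep (PySem.Dict.empty, false)).2 then count + 1 else count) = _
  rw [hkey]
  have hperm : (PySem.List.sorted s (fun x => x) false).Perm s := PySem.List.sorted_perm ..
  have hadj := pvAdjEq_of_sorted (PySem.List.sorted s (fun x => x) false)
    (by simpa using PySem.List.sorted_pairwise s (fun x => x))
  have hnd : (PySem.List.sorted s (fun x => x) false).Nodup ↔ s.Nodup := hperm.nodup_iff
  simp only [hadj]
  by_cases h : s.Nodup
  · simp [h, hnd.2 h]
  · simp [h, (not_iff_not.2 hnd).2 h]
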